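-- pv_equiv track=rewrite | github.com/lucas1farias/my_db_js | BEECROWD/2423_bolo_apisc2.py | monitorar_ingredientes
-- ===== SOURCE A (Python) =====
-- def monitorar_ingredientes(a, b, c):
--     farinha, ovos, leite = 2, 3, 5
--     contador = 0
--
--     # 4 6 9 -> 2 3 4
--     while a >= farinha and b >= ovos and c >= leite:
--         contador += 1
--         a -= farinha
--         b -= ovos
--         c -= leite
--
--     return contador
-- ===== SOURCE B (Python) =====
-- def monitorar_ingredientes(a, b, c):
--     return max(0, min(a // 2, b // 3, c // 5))
-- ===== Notes on version B (the rewrite author's own statement) =====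
-- stated objective: faster
-- what changed: Replaces the repeated-subtraction while loop with the closed form max(0, min(a//2, b//3, c//5)).
import Mathlib
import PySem

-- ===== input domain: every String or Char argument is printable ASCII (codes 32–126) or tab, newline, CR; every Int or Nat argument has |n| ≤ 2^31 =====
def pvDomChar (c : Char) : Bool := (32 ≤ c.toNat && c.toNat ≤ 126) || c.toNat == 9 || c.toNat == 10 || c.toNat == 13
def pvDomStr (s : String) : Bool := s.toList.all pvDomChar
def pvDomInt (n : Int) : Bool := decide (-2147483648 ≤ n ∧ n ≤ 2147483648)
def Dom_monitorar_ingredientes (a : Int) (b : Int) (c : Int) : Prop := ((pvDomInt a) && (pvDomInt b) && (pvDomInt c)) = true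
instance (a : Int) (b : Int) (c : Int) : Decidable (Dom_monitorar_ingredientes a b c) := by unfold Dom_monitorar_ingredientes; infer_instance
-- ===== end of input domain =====

-- B replaces A's repeated-subtraction loop with the closed form max(0, min(a//2, b//3, c//5)) (objective: faster, O(1)).

-- ===== PORT A =====
-- the while loop, state (a, b, c, contador); terminates because a strictly decreases while a ≥ 2
def miLoop (a b c contador : Int) : Int :=
  if a ≥ 2 ∧ b ≥ 3 ∧ c ≥ 5 then miLoop (a - 2) (b - 3) (c - 5) (contador + 1) else contador
termination_by a.toNat
decreasing_by omega

def monitorar_ingredientes (a : Int) (b : Int) (c : Int) : Int := miLoop a b c 0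

-- ===== PORT B =====
def monitorar_ingredientes_alt (a : Int) (b : Int) (c : Int) : Int :=
  max 0 (min (PySem.Int.floordiv a 2) (min (PySem.Int.floordiv b 3) (PySem.Int.floordiv c 5)))

-- ===== PRECONDITION & SPEC =====
def Spec_monitorar_ingredientes (a : Int) (b : Int) (c : Int) (out : Int) : Prop := out = monitorar_ingredientes_alt a b c
instance (a : Int) (b : Int) (c : Int) (out : Int) : Decidable (Spec_monitorar_ingredientes a b c out) := by unfold Spec_monitorar_ingredientes; infer_instance

-- ===== CLAIM (what is proved, stated in full; the proofs are below) =====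
def Claim_equal_monitorar_ingredientes : Prop := ∀ (a : Int) (b : Int) (c : Int), Dom_monitorar_ingredientes a b c → Spec_monitorar_ingredientes a b c (monitorar_ingredientes a b c)

-- ===== LEMMAS AND PROOFS =====
lemma miLoop_closed (n : Nat) : ∀ (a b c k : Int), a.toNat ≤ n →
    miLoop a b c k = k + max 0 (min (PySem.Int.floordiv a 2) (min (PySem.Int.floordiv b 3) (PySem.Int.floordiv c 5))) := by
  induction n with
  | zero =>
    intro a b c k h
    rw [miLoop]
    rw [PySem.Int.floordiv_eq_ediv_of_pos (by omega), PySem.Int.floordiv_eq_ediv_of_pos (by omega),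
        PySem.Int.floordiv_eq_ediv_of_pos (by omega)]
    have ha : a ≤ 0 := by omega
    rw [if_neg (by omega)]
    omega
  | succ n ih =>
    intro a b c k h
    rw [miLoop]
    by_cases hc : a ≥ 2 ∧ b ≥ 3 ∧ c ≥ 5
    · rw [if_pos hc, ih (a - 2) (b - 3) (c - 5) (k + 1) (by omega)]
      rw [PySem.Int.floordiv_eq_ediv_of_pos (by omega), PySem.Int.floordiv_eq_ediv_of_pos (by omega),
          PySem.Int.floordiv_eq_ediv_of_pos (by omega), PySem.Int.floordiv_eq_ediv_of_pos (by omega),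
          PySem.Int.floordiv_eq_ediv_of_pos (by omega), PySem.Int.floordiv_eq_ediv_of_pos (by omega)]
      omega
    · rw [if_neg hc]
      rw [PySem.Int.floordiv_eq_ediv_of_pos (by omega), PySem.Int.floordiv_eq_ediv_of_pos (by omega),
          PySem.Int.floordiv_eq_ediv_of_pos (by omega)]
      omega

-- ===== VERDICT (by name: the statement is the Claim_ definition above) =====
theorem monitorar_ingredientes_spec : Claim_equal_monitorar_ingredientes := by
  intro a b c _
  unfold Spec_monitorar_ingredientes monitorar_ingredientes monitorar_ingredientes_alt
  rw [miLoop_closed a.toNat a b c 0 le_rfl]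
  omega
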